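-- pv_equiv track=rewrite | github.com/techn4r/DevTeam-Notifier-Bot | app/crud.py | branch_matches
-- ===== SOURCE A (Python) =====
-- def branch_matches(branch: str, branches_filter: str | None) -> bool:
--     if not branches_filter:
--         return True
--
--     branch = branch.strip()
--     patterns = [p.strip() for p in branches_filter.split(",") if p.strip()]
--
--     if not patterns:
--         return True
--
--     for pattern in patterns:
--         if pattern.endswith("/*"):
--             prefix = pattern[:-2]
--             if branch.startswith(prefix + "/"):
--                 return True
--         else:
--             if branch == pattern:
--                 return True
--
--     return False
-- ===== SOURCE B (Python) =====
-- def branch_matches(branch: str, branches_filter: str | None) -> bool: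
--     # Inverted matching: enumerate every pattern string that could match this branch
--     # (the branch itself, plus one wildcard pattern per '/' in it), then test each
--     # configured pattern by set membership instead of matching it against the branch.
--     if not branches_filter:
--         return True
--     b = branch.strip()
--     candidates = {b}
--     for i, ch in enumerate(b):
--         if ch == "/":
--             candidates.add(b[:i] + "/*")
--     patterns = [p.strip() for p in branches_filter.split(",") if p.strip()]
--     return not patterns or any(p in candidates for p in patterns)
-- ===== Notes on version B (the rewrite author's own statement) =====
-- stated objective: alternative
-- what changed: B inverts the matching direction: instead of testing each pattern against the branch (equality or '/*'-prefix), it first enumerates from the branch itself the finite set of pattern strings that could match it (the branch plus one 'prefix/*' candidate per '/' position) and then checks each configured pattern by membership in that set, with no string matching in the pattern loop.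
import Mathlib
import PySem

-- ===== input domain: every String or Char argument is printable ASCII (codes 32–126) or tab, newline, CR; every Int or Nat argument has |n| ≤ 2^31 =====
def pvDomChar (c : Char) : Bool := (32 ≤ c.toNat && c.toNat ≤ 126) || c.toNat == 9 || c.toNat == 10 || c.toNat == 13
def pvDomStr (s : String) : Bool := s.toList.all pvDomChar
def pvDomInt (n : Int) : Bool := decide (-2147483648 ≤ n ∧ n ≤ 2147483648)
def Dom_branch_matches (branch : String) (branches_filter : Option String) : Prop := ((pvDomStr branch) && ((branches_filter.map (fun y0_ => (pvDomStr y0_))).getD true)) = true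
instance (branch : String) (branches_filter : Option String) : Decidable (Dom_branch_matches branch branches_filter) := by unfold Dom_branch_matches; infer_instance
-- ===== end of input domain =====

-- B inverts the matching direction: it enumerates from the branch the set of pattern
-- strings that could match it, then tests the configured patterns by set membership
-- (an alternative algorithm of similar cost, not claimed faster).

-- ===== PORT A =====
-- A's for-loop with early return, as structural recursion over the pattern list
def branchLoopA (b : String) : List String → Bool
  | [] => false
  | pattern :: rest =>
    if PySem.Str.endswith pattern "/*" then
      -- prefix = pattern[:-2], inlined into the startswith test
      if PySem.Str.startswith b (PySem.Str.slice pattern none (some (-2)) ++ "/") then true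
      else branchLoopA b rest
    else
      if b == pattern then true else branchLoopA b rest

def branch_matches (branch : String) (branches_filter : Option String) : Bool :=
  match branches_filter with
  | none => true
  | some f =>
    if f == "" then true
    else
      let b := PySem.Str.strip branch
      -- f.split(","): sep is the nonempty literal ",", so Str.split? is always `some`
      let patterns := (((PySem.Str.split? f ",").getD []).filter
        (fun p => PySem.Str.strip p != "")).map PySem.Str.strip
      if patterns == [] then true
      else branchLoopA b patterns

-- ===== PORT B =====
-- B's candidate-set builder: for i, ch in enumerate(b): if ch == '/': add b[:i] + "/*"
def branchCandStep (b : String) (s : PySem.Set String) (p : Int × Char) : PySem.Set String :=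
  if p.2 == '/' then PySem.Set.add s (PySem.Str.slice b none (some p.1) ++ "/*") else s

def branch_matches_alt (branch : String) (branches_filter : Option String) : Bool :=
  match branches_filter with
  | none => true
  | some f =>
    if f == "" then true
    else
      let b := PySem.Str.strip branch
      let candidates := (PySem.List.enumerate b.toList).foldl (branchCandStep b)
        (PySem.Set.add PySem.Set.empty b)
      -- f.split(","): sep is the nonempty literal ",", so Str.split? is always `some`
      let patterns := (((PySem.Str.split? f ",").getD []).filter
        (fun p => PySem.Str.strip p != "")).map PySem.Str.strip
      patterns == [] || patterns.any (fun p => PySem.Set.contains candidates p)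

-- ===== PRECONDITION & SPEC =====
def Spec_branch_matches (branch : String) (branches_filter : Option String) (out : Bool) : Prop := out = branch_matches_alt branch branches_filter
instance (branch : String) (branches_filter : Option String) (out : Bool) : Decidable (Spec_branch_matches branch branches_filter out) := by unfold Spec_branch_matches; infer_instance

-- ===== CLAIM (what is proved, stated in full; the proofs are below) =====
def Claim_equal_branch_matches : Prop := ∀ (branch : String) (branches_filter : Option String), Dom_branch_matches branch branches_filter → Spec_branch_matches branch branches_filter (branch_matches branch branches_filter)

-- ===== LEMMAS AND PROOFS =====

-- A's early-return loop is `any` of the per-pattern test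
def branchTestA (b p : String) : Bool :=
  if PySem.Str.endswith p "/*" then
    PySem.Str.startswith b (PySem.Str.slice p none (some (-2)) ++ "/")
  else b == p

theorem branchLoopA_eq_any (b : String) (ps : List String) :
    branchLoopA b ps = ps.any (branchTestA b) := by
  induction ps with
  | nil => rfl
  | cons p rest ih =>
    rw [branchLoopA, List.any_cons, ← ih, branchTestA]
    split <;> split <;> simp_all

-- membership in the candidate fold
theorem mem_candStep_fold (b : String) (l : List (Int × Char)) (s : PySem.Set String)
    (x : String) : x ∈ l.foldl (branchCandStep b) s ↔
      x ∈ s ∨ ∃ q ∈ l, q.2 = '/' ∧ x = PySem.Str.slice b none (some q.1) ++ "/*" := by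
  induction l generalizing s with
  | nil => simp
  | cons q rest ih =>
    rw [List.foldl_cons, ih]
    unfold branchCandStep
    by_cases h : q.2 = '/'
    · rw [if_pos (by simpa using h)]
      rw [PySem.Set.mem_add]
      constructor
      · rintro (⟨hs | he⟩ | ⟨r, hr, hr2, hx⟩)
        · exact Or.inl hs
        · exact Or.inr ⟨q, by simp, h, he⟩
        · exact Or.inr ⟨r, by simp [hr], hr2, hx⟩
      · rintro (hs | ⟨r, hr, hr2, hx⟩)
        · exact Or.inl (Or.inl hs)
        · rcases List.mem_cons.mp hr with rfl | hr'
          · exact Or.inl (Or.inr hx)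
          · exact Or.inr ⟨r, hr', hr2, hx⟩
    · rw [if_neg (by simpa using h)]
      constructor
      · rintro (hs | ⟨r, hr, hr2, hx⟩)
        · exact Or.inl hs
        · exact Or.inr ⟨r, by simp [hr], hr2, hx⟩
      · rintro (hs | ⟨r, hr, hr2, hx⟩)
        · exact Or.inl hs
        · rcases List.mem_cons.mp hr with rfl | hr'
          · exact absurd hr2 h
          · exact Or.inr ⟨r, hr', hr2, hx⟩

-- strings equal iff their char lists are
theorem str_eq_iff_toList (s t : String) : s = t ↔ s.toList = t.toList :=
  ⟨fun h => h ▸ rfl, fun h => by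
    have := congrArg String.ofList h
    simpa [String.ofList_toList] using this⟩

theorem toList_candidate (b : String) (k : Nat) :
    (PySem.Str.slice b none (some (k : Int)) ++ "/*").toList = b.toList.take k ++ ['/', '*'] := by
  rw [String.toList_append, PySem.Str.toList_slice]
  have : PySem.Chars.slice b.toList none (some (k : Int)) = b.toList.take k := by
    exact PySem.List.slice_to _ (by positivity)
  rw [this]
  rfl

-- core pointwise fact: A's per-pattern test = membership in B's candidate set
theorem testA_eq_contains (b p : String) :
    branchTestA b p =
      PySem.Set.contains
        ((PySem.List.enumerate b.toList).foldl (branchCandStep b)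
          (PySem.Set.add PySem.Set.empty b)) p := by
  rw [Bool.eq_iff_iff, PySem.Set.contains_iff, mem_candStep_fold]
  have hmem : ∀ (q : Int × Char), q ∈ PySem.List.enumerate b.toList ↔
      ∃ k, ∃ (h : k < b.toList.length), q = ((k : Int), b.toList[k]) := by
    intro q
    simpa using PySem.List.mem_enumerate_iff b.toList 0 q
  have hadd : p ∈ PySem.Set.add (PySem.Set.empty : PySem.Set String) b ↔ p = b := by
    rw [PySem.Set.mem_add]; simp [PySem.Set.empty]
  unfold branchTestA
  by_cases hend : PySem.Str.endswith p "/*" = true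
  · rw [if_pos hend]
    -- p ends with "/*": P = Q ++ ['/','*']
    rw [PySem.Str.endswith_eq, PySem.Chars.endswith_iff] at hend
    obtain ⟨Q, hQ⟩ := hend
    have hQeq : (PySem.Str.slice p none (some (-2))).toList = Q := by
      rw [PySem.Str.toList_slice]
      have h2 : PySem.Chars.slice p.toList none (some (-2)) = p.toList.take (p.toList.length - 2) := by
        exact PySem.List.slice_to_neg_ofNat _ 2 (by omega)
      rw [h2, ← hQ]
      simp
    have hsw : PySem.Str.startswith b (PySem.Str.slice p none (some (-2)) ++ "/") = true ↔
        Q ++ ['/'] <+: b.toList := by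
      rw [PySem.Str.startswith_eq, PySem.Chars.startswith_iff, String.toList_append, hQeq]
      rfl
    constructor
    · intro hs
      rw [hsw] at hs
      obtain ⟨t, ht⟩ := hs
      refine Or.inr ⟨((Q.length : Int), '/'), ?_, rfl, ?_⟩
      · rw [← ht, List.append_assoc, PySem.List.enumerate_append]
        simp [PySem.List.enumerate_cons]
      · rw [str_eq_iff_toList, toList_candidate, ← hQ]
        have htake : b.toList.take Q.length = Q := by rw [← ht]; simp
        rw [htake]
        rfl
    · rintro (hpb | ⟨q, hq, hq2, hx⟩)
      · -- p = b: b = Q ++ "/*" starts with Q ++ "/"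
        have hpb' : p = b := hadd.mp hpb
        rw [hsw]
        refine ⟨['*'], ?_⟩
        rw [← hpb', ← hQ]; simp
      · rw [hmem] at hq
        obtain ⟨k, hk, rfl⟩ := hq
        simp only at hq2 hx
        rw [str_eq_iff_toList, toList_candidate, ← hQ] at hx
        have hQk : Q = b.toList.take k := by
          have := List.append_inj_left' hx (by rfl)
          exact this
        have hklen : k ≤ b.toList.length := le_of_lt hk
        rw [hsw, hQk]
        refine ⟨b.toList.drop (k+1), ?_⟩
        have : b.toList.take k ++ ['/'] = b.toList.take (k+1) := by
          rw [List.take_add_one]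
          simp [hq2, List.getElem?_eq_getElem hk]
        rw [this, List.take_append_drop]
  · rw [if_neg hend]
    -- p does not end with "/*": no slice-candidate can equal p, so contains ↔ p = b
    have hnc : ∀ q : Int × Char, q ∈ PySem.List.enumerate b.toList → q.2 = '/' →
        p ≠ PySem.Str.slice b none (some q.1) ++ "/*" := by
      rintro q hq _ rfl
      apply hend
      rw [hmem] at hq
      obtain ⟨k, hk, rfl⟩ := hq
      rw [PySem.Str.endswith_eq, PySem.Chars.endswith_iff, toList_candidate]
      exact ⟨b.toList.take k, by rfl⟩
    constructor
    · intro hbp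
      exact Or.inl (hadd.mpr (eq_of_beq hbp).symm)
    · rintro (hs | ⟨q, hq, hq2, hx⟩)
      · have hpb : p = b := hadd.mp hs
        simp [hpb]
      · exact absurd hx (hnc q hq hq2)

-- ===== VERDICT (by name: the statement is the Claim_ definition above) =====
theorem branch_matches_spec : Claim_equal_branch_matches := by
  intro branch bf _
  unfold Spec_branch_matches
  cases bf with
  | none => rfl
  | some f =>
    simp only [branch_matches, branch_matches_alt]
    by_cases hf : (f == "") = true
    · rw [if_pos hf, if_pos hf]
    · rw [if_neg hf, if_neg hf]
      set b := PySem.Str.strip branch with hb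
      set ps := ((((PySem.Str.split? f ",").getD []).filter
        (fun p => PySem.Str.strip p != "")).map PySem.Str.strip) with hps
      by_cases hemp : ps = []
      · rw [hemp]; simp
      · rw [if_neg (by simpa using hemp)]
        rw [Bool.eq_iff_iff]
        simp only [Bool.or_eq_true, beq_iff_eq]
        rw [branchLoopA_eq_any]
        constructor
        · intro h
          rw [List.any_eq_true] at h
          obtain ⟨p, hp, ht⟩ := h
          refine Or.inr ?_
          rw [List.any_eq_true]
          exact ⟨p, hp, by rw [← testA_eq_contains]; exact ht⟩
        · rintro (h | h)
          · exact absurd h hemp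
          · rw [List.any_eq_true] at h ⊢
            obtain ⟨p, hp, ht⟩ := h
            exact ⟨p, hp, by rw [testA_eq_contains]; exact ht⟩
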